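-- pv_equiv track=rewrite | github.com/kouui/spectra-deprecated | src/Util/Nist/LevelQuery.py | is_useless
-- ===== SOURCE A (Python) =====
-- def is_useless(line):
--
--     if line[0] == '-':
--         return True
--     else:
--         split_set = set( [item.strip() for item in line.split('|')] )
--         if len( split_set )==1 and '' in split_set:
--             return True
--         else:
--             return False
-- ===== SOURCE B (Python) =====
-- def is_useless(line):
--     if line[0] == '-':
--         return True
--     return all(c == '|' or c.isspace() for c in line)
-- ===== Notes on version B (the rewrite author's own statement) =====
-- stated objective: simpler
-- what changed: Replaces A's split-on-'|' / strip-each-field / build-a-set / len==1-and-''-membership pipeline with a single character-level pass: after the same leading '-' guard, B returns all(c == '|' or c.isspace() for c in line), allocating no intermediate lists or sets.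
-- outside the precondition, e.g. on is_useless(''): A raises IndexError, B raises IndexError
import Mathlib
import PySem

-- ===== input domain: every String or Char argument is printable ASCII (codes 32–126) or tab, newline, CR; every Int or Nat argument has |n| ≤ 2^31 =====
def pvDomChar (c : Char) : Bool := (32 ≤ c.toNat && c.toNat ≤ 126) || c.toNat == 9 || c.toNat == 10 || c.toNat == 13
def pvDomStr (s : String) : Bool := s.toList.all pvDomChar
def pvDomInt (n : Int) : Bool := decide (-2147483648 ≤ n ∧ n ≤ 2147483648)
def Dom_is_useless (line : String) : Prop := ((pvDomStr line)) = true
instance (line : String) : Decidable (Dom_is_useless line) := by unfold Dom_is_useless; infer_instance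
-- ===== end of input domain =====

-- B replaces A's split/strip/set pipeline with one character-level pass; objective: simpler.

-- ===== PORT A =====
def is_useless (line : String) : Bool :=
  if PySem.Str.pyGet? line 0 == some '-' then
    true
  else
    let split_set : PySem.Set String :=
      PySem.Set.ofList (((PySem.Str.split? line "|").getD []).map (fun item => PySem.Str.strip item))
    if PySem.Set.len split_set == 1 && PySem.Set.contains split_set "" then
      true
    else
      false

-- ===== PORT B =====
def is_useless_alt (line : String) : Bool :=
  if PySem.Str.pyGet? line 0 == some '-' then
    true
  else
    line.toList.all (fun c => c == '|' || PySem.Chars.isspace c)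

-- ===== PRECONDITION & SPEC =====
-- Pre_ excludes only the empty string, on which Python's line[0] raises IndexError (in A and in B alike).
def Pre_is_useless (line : String) : Prop := line ≠ ""
instance (line : String) : Decidable (Pre_is_useless line) := by unfold Pre_is_useless; infer_instance

def pvWitness_is_useless : String := " | "

def Spec_is_useless (line : String) (out : Bool) : Prop := out = is_useless_alt line
instance (line : String) (out : Bool) : Decidable (Spec_is_useless line out) := by unfold Spec_is_useless; infer_instance

-- ===== CLAIM (what is proved, stated in full; the proofs are below) =====
def Claim_equal_is_useless : Prop := ∀ (line : String), Dom_is_useless line → Pre_is_useless line → Spec_is_useless line (is_useless line)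

-- ===== LEMMAS AND PROOFS =====

-- splitOn's worker never returns an empty list of fields
lemma go_ne_nil (fuel : Nat) : ∀ (l cur : List Char) (acc : List (List Char)),
    PySem.Chars.splitOn.go ['|'] fuel l cur acc ≠ [] := by
  induction fuel with
  | zero => intro l cur acc; simp [PySem.Chars.splitOn.go]
  | succ n ih =>
    intro l cur acc
    cases l with
    | nil => simp [PySem.Chars.splitOn.go]
    | cons c rest =>
      simp only [PySem.Chars.splitOn.go]
      split
      · exact ih _ _ _
      · exact ih _ _ _

-- all fields of splitOn.go are all-whitespace iff the accumulated state is and every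
-- remaining character is whitespace or the separator
lemma go_all (fuel : Nat) : ∀ (l cur : List Char) (acc : List (List Char)),
    l.length < fuel →
    ((∀ f ∈ PySem.Chars.splitOn.go ['|'] fuel l cur acc, ∀ c ∈ f, PySem.Chars.isspace c) ↔
      ((∀ f ∈ acc, ∀ c ∈ f, PySem.Chars.isspace c) ∧ (∀ c ∈ cur, PySem.Chars.isspace c) ∧
        (∀ c ∈ l, PySem.Chars.isspace c ∨ c = '|'))) := by
  induction fuel with
  | zero => intro l cur acc h; omega
  | succ n ih =>
    intro l cur acc h
    cases l with
    | nil =>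
      simp only [PySem.Chars.splitOn.go]
      constructor
      · intro hall
        refine ⟨fun f hf c hc => hall f (by simp [hf]) c hc,
                fun c hc => hall cur.reverse (by simp) c (by simp [hc]), by simp⟩
      · rintro ⟨ha, hc, -⟩
        intro f hf c hcf
        simp only [List.mem_reverse, List.mem_cons] at hf
        rcases hf with rfl | hf
        · exact hc c (List.mem_reverse.mp hcf)
        · exact ha f hf c hcf
    | cons c rest =>
      simp only [PySem.Chars.splitOn.go]
      split
      · rename_i hpre
        have hc : c = '|' := by
          have := by simpa [List.isPrefixOf] using hpre
          exact this.symm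
        subst hc
        rw [ih _ _ _ (by simp at h ⊢; omega)]
        constructor
        · rintro ⟨ha, -, hr⟩
          refine ⟨fun f hf hc hcf => ha f (by simp [hf]) hc hcf, ?_, ?_⟩
          · intro x hx
            exact ha cur.reverse (by simp) x (by simpa using hx)
          · intro x hx
            simp only [List.mem_cons] at hx
            rcases hx with rfl | hx
            · right; rfl
            · simpa using hr x (by simpa using hx)
        · rintro ⟨ha, hcur, hl⟩
          refine ⟨?_, by simp, ?_⟩
          · intro f hf x hx
            simp only [List.mem_cons, List.mem_reverse] at hf
            rcases hf with rfl | hf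
            · exact hcur x (List.mem_reverse.mp hx)
            · exact ha f hf x hx
          · intro x hx
            simpa using hl x (by simp [List.mem_cons]; right; simpa using hx)
      · rename_i hpre
        have hc : c ≠ '|' := by
          simp [List.isPrefixOf] at hpre
          exact fun h => absurd h.symm hpre
        rw [ih _ _ _ (by simp at h ⊢; omega)]
        constructor
        · rintro ⟨ha, hcur, hr⟩
          refine ⟨ha, fun x hx => hcur x (by simp [hx]), ?_⟩
          intro x hx
          simp only [List.mem_cons] at hx
          rcases hx with rfl | hx
          · left; exact hcur x (by simp)
          · exact hr x hx
        · rintro ⟨ha, hcur, hl⟩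
          refine ⟨ha, ?_, fun x hx => hl x (by simp [hx])⟩
          intro x hx
          simp only [List.mem_cons] at hx
          rcases hx with rfl | hx
          · rcases hl x (by simp) with h' | h'
            · exact h'
            · exact absurd h' hc
          · exact hcur x hx

-- item.strip() == '' iff every character of item is whitespace
lemma strip_eq_nil_iff (f : List Char) :
    PySem.Chars.strip f = [] ↔ ∀ c ∈ f, PySem.Chars.isspace c := by
  unfold PySem.Chars.strip PySem.Chars.rstrip PySem.Chars.lstrip
  rw [List.reverse_eq_nil_iff, List.dropWhile_eq_nil_iff]
  constructor
  · intro h c hc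
    rw [← List.takeWhile_append_dropWhile (p := PySem.Chars.isspace) (l := f)] at hc
    rcases List.mem_append.mp hc with h1 | h2
    · exact List.mem_takeWhile_imp h1
    · exact h c (List.mem_reverse.mpr h2)
  · intro h c hc
    exact h c ((List.dropWhile_sublist _).subset (List.mem_reverse.mp hc))

-- set(xs) has len 1 and contains '' iff xs is nonempty and every element is ''
lemma set_singleton_empty_iff (xs : List String) :
    (PySem.Set.len (PySem.Set.ofList xs) = 1 ∧ PySem.Set.contains (PySem.Set.ofList xs) "" = true) ↔
      (xs ≠ [] ∧ ∀ x ∈ xs, x = "") := by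
  constructor
  · rintro ⟨hlen, hmem⟩
    have h1 : "" ∈ PySem.Set.ofList xs := by
      simpa [PySem.Set.contains] using hmem
    have hx : PySem.Set.ofList xs = [""] := by
      match hS : PySem.Set.ofList xs with
      | [] => simp [hS] at h1
      | [a] =>
        rw [hS] at h1
        simp at h1
        simp [h1]
      | a :: b :: t =>
        rw [hS] at hlen
        simp [PySem.Set.len] at hlen
        omega
    constructor
    · rintro rfl
      simp [PySem.Set.ofList] at hx
    · intro x hxm
      have := (PySem.Set.mem_ofList xs x).mpr hxm
      rw [hx] at this
      simpa using this
  · rintro ⟨hne, hall⟩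
    have hx : PySem.Set.ofList xs = [""] := by
      have hnd := PySem.Set.nodup_ofList (xs := xs)
      have hsub : ∀ x ∈ PySem.Set.ofList xs, x = "" := fun x hx =>
        hall x ((PySem.Set.mem_ofList xs x).mp hx)
      have hne' : PySem.Set.ofList xs ≠ [] := by
        match xs, hne with
        | y :: ys, _ =>
          have : y ∈ PySem.Set.ofList (y :: ys) := (PySem.Set.mem_ofList _ y).mpr (by simp)
          exact List.ne_nil_of_mem this
      match hS : PySem.Set.ofList xs with
      | [] => exact absurd hS hne'
      | [a] => simp [hsub a (by rw [hS]; simp)]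
      | a :: b :: t =>
        rw [hS] at hnd hsub
        have ha := hsub a (by simp)
        have hb := hsub b (by simp)
        simp [ha, hb] at hnd
    rw [hx]
    simp [PySem.Set.len, PySem.Set.contains]

-- the two else-branches agree on every line
lemma ite_bool_iff (P : Prop) [Decidable P] :
    ((if P then (true : Bool) else false) = true) ↔ P := by
  split <;> simp_all

lemma else_eq (line : String) :
    (let split_set : PySem.Set String :=
      PySem.Set.ofList (((PySem.Str.split? line "|").getD []).map (fun item => PySem.Str.strip item))
    if PySem.Set.len split_set == 1 && PySem.Set.contains split_set "" then true else false)
      = line.toList.all (fun c => c == '|' || PySem.Chars.isspace c) := by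
  have hsplit : PySem.Str.split? line "|" =
      some ((PySem.Chars.splitOn line.toList ['|']).map (fun f => String.ofList f)) := by
    simp [PySem.Str.split?, PySem.Chars.split?]
  rw [Bool.eq_iff_iff]
  rw [hsplit]
  simp only [Option.getD_some, List.map_map, Bool.and_eq_true, beq_iff_eq]
  rw [ite_bool_iff, List.all_eq_true]
  rw [set_singleton_empty_iff]
  have hstrip : ∀ f : List Char,
      (PySem.Str.strip (String.ofList f) = "") ↔ PySem.Chars.strip f = [] := by
    intro f
    constructor
    · intro h
      have := congrArg String.toList h
      simpa [PySem.Str.toList_strip] using this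
    · intro h
      apply String.ext
      simpa [PySem.Str.toList_strip] using h
  constructor
  · rintro ⟨-, hall⟩
    intro c hc
    have key := (go_all (line.toList.length + 1) line.toList [] [] (by omega)).mp ?_
    · simp only [Bool.or_eq_true, beq_iff_eq]
      rcases key.2.2 c hc with h | h
      · right; exact h
      · left; exact h
    · intro f hf x hx
      have hmem : PySem.Str.strip (String.ofList f) = "" := by
        apply hall
        simp only [List.mem_map, Function.comp]
        exact ⟨f, hf, rfl⟩
      exact (strip_eq_nil_iff f).mp ((hstrip f).mp hmem) x hx
  · intro hchar
    constructor
    · simp only [ne_eq, List.map_eq_nil_iff]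
      exact go_ne_nil _ _ _ _
    · intro x hx
      simp only [List.mem_map, Function.comp] at hx
      obtain ⟨f, hf, rfl⟩ := hx
      apply (hstrip f).mpr
      apply (strip_eq_nil_iff f).mpr
      intro c hc
      have key := (go_all (line.toList.length + 1) line.toList [] [] (by omega)).mpr
        ⟨by simp, by simp, ?_⟩
      · exact key f hf c hc
      · intro y hy
        have := hchar y hy
        simp only [Bool.or_eq_true, beq_iff_eq] at this
        rcases this with h | h
        · right; exact h
        · left; exact h

-- ===== VERDICT (by name: the statement is the Claim_ definition above) =====
theorem is_useless_spec : Claim_equal_is_useless := by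
  intro line _ _
  unfold Spec_is_useless is_useless is_useless_alt
  cases hb : (PySem.Str.pyGet? line 0 == some '-') with
  | true => rw [if_pos rfl, if_pos rfl]
  | false =>
    simp only [Bool.false_eq_true, if_false]
    exact else_eq line
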